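-- pv_equiv track=rewrite | github.com/zephyree251/used-code | benchmark_focus.py | _action_stats
-- ===== SOURCE A (Python) =====
-- from typing import Dict, List
--
-- def _action_stats(logs: List[str]) -> Dict[str, int]:
--     out = {"reroute": 0, "power_boost": 0, "maintain": 0}
--     for log in logs:
--         if "Reroute" in log:
--             out["reroute"] += 1
--         elif "Power_Boost" in log:
--             out["power_boost"] += 1
--         elif "Maintain" in log:
--             out["maintain"] += 1
--     return out
-- ===== SOURCE B (Python) =====
-- from typing import Dict, List
--
-- def _action_stats(logs: List[str]) -> Dict[str, int]:
--     return {
--         "reroute": sum(1 for log in logs if "Reroute" in log),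
--         "power_boost": sum(1 for log in logs
--                            if "Power_Boost" in log and "Reroute" not in log),
--         "maintain": sum(1 for log in logs
--                         if "Maintain" in log and "Reroute" not in log
--                         and "Power_Boost" not in log),
--     }
-- ===== Notes on version B (the rewrite author's own statement) =====
-- stated objective: alternative
-- what changed: Replaced the single stateful priority loop over a mutable dict with a direct dict literal of three independent generator-expression counts (the elif priority becomes negative membership guards).
import Mathlib
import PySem

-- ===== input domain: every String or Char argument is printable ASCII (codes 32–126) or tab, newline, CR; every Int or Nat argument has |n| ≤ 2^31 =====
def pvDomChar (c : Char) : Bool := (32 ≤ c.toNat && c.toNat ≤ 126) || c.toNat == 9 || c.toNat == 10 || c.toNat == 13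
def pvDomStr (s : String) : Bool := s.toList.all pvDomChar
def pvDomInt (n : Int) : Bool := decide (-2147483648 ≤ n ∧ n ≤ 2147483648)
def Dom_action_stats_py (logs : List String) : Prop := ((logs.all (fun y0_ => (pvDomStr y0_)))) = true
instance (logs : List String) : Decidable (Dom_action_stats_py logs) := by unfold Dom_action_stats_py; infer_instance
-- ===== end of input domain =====

-- B replaces A's single priority loop over a mutable dict by three independent
-- one-pass counts (generator expressions); same cost, different decomposition.

-- ===== PORT A =====
def action_stats_py (logs : List String) : List (String × Int) :=
  let out : PySem.Dict String Int :=
    ((PySem.Dict.empty.insert "reroute" 0).insert "power_boost" 0).insert "maintain" 0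
  (logs.foldl (fun out log =>
    if PySem.Str.isIn "Reroute" log then
      out.insert "reroute" (out.getD "reroute" 0 + 1)
    else if PySem.Str.isIn "Power_Boost" log then
      out.insert "power_boost" (out.getD "power_boost" 0 + 1)
    else if PySem.Str.isIn "Maintain" log then
      out.insert "maintain" (out.getD "maintain" 0 + 1)
    else out) out).items

-- ===== PORT B =====
def action_stats_py_alt (logs : List String) : List (String × Int) :=
  [("reroute", (logs.countP (fun log => PySem.Str.isIn "Reroute" log) : Int)),
   ("power_boost", (logs.countP (fun log =>
      PySem.Str.isIn "Power_Boost" log && !PySem.Str.isIn "Reroute" log) : Int)),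
   ("maintain", (logs.countP (fun log =>
      PySem.Str.isIn "Maintain" log && !PySem.Str.isIn "Reroute" log
        && !PySem.Str.isIn "Power_Boost" log) : Int))]

-- ===== PRECONDITION & SPEC =====
def Spec_action_stats_py (logs : List String) (out : List (String × Int)) : Prop := out = action_stats_py_alt logs
instance (logs : List String) (out : List (String × Int)) : Decidable (Spec_action_stats_py logs out) := by unfold Spec_action_stats_py; infer_instance

-- ===== CLAIM (what is proved, stated in full; the proofs are below) =====
def Claim_equal_action_stats_py : Prop := ∀ (logs : List String), Dom_action_stats_py logs → Spec_action_stats_py logs (action_stats_py logs)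

-- ===== LEMMAS AND PROOFS =====

theorem pv_ins_r (r p m v : Int) :
    (PySem.Dict.mk [("reroute", r), ("power_boost", p), ("maintain", m)]).insert "reroute" v
    = PySem.Dict.mk [("reroute", v), ("power_boost", p), ("maintain", m)] := rfl
theorem pv_ins_p (r p m v : Int) :
    (PySem.Dict.mk [("reroute", r), ("power_boost", p), ("maintain", m)]).insert "power_boost" v
    = PySem.Dict.mk [("reroute", r), ("power_boost", v), ("maintain", m)] := rfl
theorem pv_ins_m (r p m v : Int) :
    (PySem.Dict.mk [("reroute", r), ("power_boost", p), ("maintain", m)]).insert "maintain" v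
    = PySem.Dict.mk [("reroute", r), ("power_boost", p), ("maintain", v)] := rfl
theorem pv_getD_r (r p m : Int) :
    (PySem.Dict.mk [("reroute", r), ("power_boost", p), ("maintain", m)]).getD "reroute" 0 = r := rfl
theorem pv_getD_p (r p m : Int) :
    (PySem.Dict.mk [("reroute", r), ("power_boost", p), ("maintain", m)]).getD "power_boost" 0 = p := rfl
theorem pv_getD_m (r p m : Int) :
    (PySem.Dict.mk [("reroute", r), ("power_boost", p), ("maintain", m)]).getD "maintain" 0 = m := rfl

theorem action_stats_key (logs : List String) (r p m : Int) :
    (logs.foldl (fun out log =>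
      if PySem.Str.isIn "Reroute" log then
        out.insert "reroute" (out.getD "reroute" 0 + 1)
      else if PySem.Str.isIn "Power_Boost" log then
        out.insert "power_boost" (out.getD "power_boost" 0 + 1)
      else if PySem.Str.isIn "Maintain" log then
        out.insert "maintain" (out.getD "maintain" 0 + 1)
      else out)
      (PySem.Dict.mk [("reroute", r), ("power_boost", p), ("maintain", m)])).items =
    [("reroute", r + (logs.countP (fun log => PySem.Str.isIn "Reroute" log) : Int)),
     ("power_boost", p + (logs.countP (fun log =>
        PySem.Str.isIn "Power_Boost" log && !PySem.Str.isIn "Reroute" log) : Int)),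
     ("maintain", m + (logs.countP (fun log =>
        PySem.Str.isIn "Maintain" log && !PySem.Str.isIn "Reroute" log
          && !PySem.Str.isIn "Power_Boost" log) : Int))] := by
  induction logs generalizing r p m with
  | nil => simp
  | cons l ls ih =>
    by_cases hR : PySem.Str.isIn "Reroute" l = true
    · rw [List.foldl_cons]
      simp only [hR, if_true, pv_getD_r, pv_ins_r]
      rw [ih]
      simp only [List.countP_cons, Bool.false_eq_true, hR, Bool.not_true, Bool.not_false,
            Bool.and_true, Bool.and_false, Bool.true_and, Bool.false_and, if_true, if_false,
            List.cons.injEq, Prod.mk.injEq, true_and, and_true]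
      omega
    · rw [Bool.not_eq_true] at hR
      by_cases hP : PySem.Str.isIn "Power_Boost" l = true
      · rw [List.foldl_cons]
        simp only [hR, hP, Bool.false_eq_true, if_true, if_false, pv_getD_p, pv_ins_p]
        rw [ih]
        simp only [List.countP_cons, Bool.false_eq_true, hR, hP, Bool.not_true, Bool.not_false,
            Bool.and_true, Bool.and_false, Bool.true_and, Bool.false_and, if_true, if_false,
            List.cons.injEq, Prod.mk.injEq, true_and, and_true]
        omega
      · rw [Bool.not_eq_true] at hP
        by_cases hM : PySem.Str.isIn "Maintain" l = true
        · rw [List.foldl_cons]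
          simp only [hR, hP, hM, Bool.false_eq_true, if_true, if_false, pv_getD_m, pv_ins_m]
          rw [ih]
          simp only [List.countP_cons, Bool.false_eq_true, hR, hP, hM, Bool.not_true, Bool.not_false,
            Bool.and_true, Bool.and_false, Bool.true_and, Bool.false_and, if_true, if_false,
            List.cons.injEq, Prod.mk.injEq, true_and, and_true]
          omega
        · rw [Bool.not_eq_true] at hM
          rw [List.foldl_cons]
          simp only [hR, hP, hM, Bool.false_eq_true, if_false]
          rw [ih]
          simp only [List.countP_cons, Bool.false_eq_true, hR, hP, hM, Bool.not_true, Bool.not_false,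
            Bool.and_true, Bool.and_false, Bool.true_and, Bool.false_and, if_true, if_false,
            List.cons.injEq, Prod.mk.injEq, true_and, and_true]
          omega

-- ===== VERDICT (by name: the statement is the Claim_ definition above) =====
theorem action_stats_py_spec : Claim_equal_action_stats_py := by
  intro logs _
  unfold Spec_action_stats_py action_stats_py action_stats_py_alt
  have h0 : ((PySem.Dict.empty.insert "reroute" (0:Int)).insert "power_boost" 0).insert "maintain" 0
      = PySem.Dict.mk [("reroute", 0), ("power_boost", 0), ("maintain", 0)] := by decide
  simp only [h0, action_stats_key, zero_add]
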